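-- pv_equiv track=rewrite | github.com/remmerton/BWT- | functions.py | generate_fibonacci_word
-- ===== SOURCE A (Python) =====
-- def generate_fibonacci_word(order, alphabet):
--     if order < 0:
--         raise ValueError("Order must be a non-negative integer")
--     if len(alphabet) != 2:
--         raise ValueError("Alphabet must contain exactly two characters")
--
--     fib_words = [alphabet[0], alphabet[1]]
--
--     for i in range(2, order + 1):
--         fib_words.append(fib_words[-1] + fib_words[-2])
--
--     return fib_words[order]
-- ===== SOURCE B (Python) =====
-- def generate_fibonacci_word(order, alphabet):
--     if order < 0:
--         raise ValueError("Order must be a non-negative integer")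
--     if len(alphabet) != 2:
--         raise ValueError("Alphabet must contain exactly two characters")
--
--     def fw2(n):
--         # returns (F(n), F(n-1)) for n >= 1
--         if n == 1:
--             return (alphabet[1], alphabet[0])
--         prev, prev2 = fw2(n - 1)
--         return (prev + prev2, prev)
--
--     if order == 0:
--         return alphabet[0]
--     return fw2(order)[0]
-- ===== Notes on version B (the rewrite author's own statement) =====
-- stated objective: alternative
-- what changed: Replaces the explicit list-building loop with indexed appends (fib_words[-1] + fib_words[-2]) by a recursive helper fw2(n) returning the pair (F(n), F(n-1)) over the Fibonacci-word recurrence, keeping only the last two words instead of the whole list; both ValueError guards are kept.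
import Mathlib
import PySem

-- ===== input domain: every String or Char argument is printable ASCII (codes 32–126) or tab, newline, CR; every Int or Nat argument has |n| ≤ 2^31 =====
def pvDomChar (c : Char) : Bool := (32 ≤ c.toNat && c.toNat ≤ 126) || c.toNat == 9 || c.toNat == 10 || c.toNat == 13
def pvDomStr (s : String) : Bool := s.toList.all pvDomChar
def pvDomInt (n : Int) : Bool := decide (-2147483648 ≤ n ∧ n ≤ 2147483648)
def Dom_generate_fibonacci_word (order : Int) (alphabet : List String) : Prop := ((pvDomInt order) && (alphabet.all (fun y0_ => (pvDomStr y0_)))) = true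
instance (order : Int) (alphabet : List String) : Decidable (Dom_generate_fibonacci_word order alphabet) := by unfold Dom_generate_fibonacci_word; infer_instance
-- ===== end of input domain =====

-- B replaces A's list-building loop by the direct Fibonacci-word recurrence fw(n) = fw(n-1) + fw(n-2); same guards, same output.

-- ===== PORT A =====
-- fib_words = [alphabet[0], alphabet[1]]; for i in range(2, order+1): append fib_words[-1] + fib_words[-2]; return fib_words[order]
def generate_fibonacci_word (order : Int) (alphabet : List String) : String :=
  let fib0 := [PySem.List.pyGetD alphabet 0 "", PySem.List.pyGetD alphabet 1 ""]
  let fib := (PySem.List.pyRange 2 (order + 1) 1).foldl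
    (fun ws _ => ws ++ [PySem.List.pyGetD ws (-1) "" ++ PySem.List.pyGetD ws (-2) ""]) fib0
  PySem.List.pyGetD fib order ""

-- ===== PORT B =====
-- the recursive helper fw2 from Source B: fw2 n = (F(n), F(n-1)) for n >= 1 (the 0 case is never reached in Source B)
def pvFw2 (a0 a1 : String) : Nat → String × String
  | 0 => (a1, a0)
  | 1 => (a1, a0)
  | n + 2 =>
    let p := pvFw2 a0 a1 (n + 1)
    (p.1 ++ p.2, p.1)

def generate_fibonacci_word_alt (order : Int) (alphabet : List String) : String :=
  if order == 0 then PySem.List.pyGetD alphabet 0 ""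
  else (pvFw2 (PySem.List.pyGetD alphabet 0 "") (PySem.List.pyGetD alphabet 1 "") order.toNat).1

-- ===== PRECONDITION & SPEC =====
-- Pre_ excludes exactly the inputs on which A raises ValueError: negative order or an alphabet not of length 2.
def Pre_generate_fibonacci_word (order : Int) (alphabet : List String) : Prop :=
  0 ≤ order ∧ alphabet.length = 2
instance (order : Int) (alphabet : List String) : Decidable (Pre_generate_fibonacci_word order alphabet) := by unfold Pre_generate_fibonacci_word; infer_instance

def pvWitness_generate_fibonacci_word : Int × List String := (4, ["a", "b"])

def Spec_generate_fibonacci_word (order : Int) (alphabet : List String) (out : String) : Prop := out = generate_fibonacci_word_alt order alphabet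
instance (order : Int) (alphabet : List String) (out : String) : Decidable (Spec_generate_fibonacci_word order alphabet out) := by unfold Spec_generate_fibonacci_word; infer_instance

-- ===== CLAIM (what is proved, stated in full; the proofs are below) =====
def Claim_equal_generate_fibonacci_word : Prop := ∀ (order : Int) (alphabet : List String), Dom_generate_fibonacci_word order alphabet → Pre_generate_fibonacci_word order alphabet → Spec_generate_fibonacci_word order alphabet (generate_fibonacci_word order alphabet)

-- ===== LEMMAS AND PROOFS =====

-- proof-side helper: the naive Fibonacci word, the common reference both ports are compared against
def pvFw (a0 a1 : String) : Nat → String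
  | 0 => a0
  | 1 => a1
  | n + 2 => pvFw a0 a1 (n + 1) ++ pvFw a0 a1 n

-- B's pair recursion computes (fw (n+1), fw n)
theorem pvFw2_eq (a0 a1 : String) (n : Nat) :
    pvFw2 a0 a1 (n + 1) = (pvFw a0 a1 (n + 1), pvFw a0 a1 n) := by
  induction n with
  | zero => rfl
  | succ m ih => simp [pvFw2, ih, pvFw]

-- fw(n+2) = fw(n+1) ++ fw(n)
theorem pvFw_succ_succ (a0 a1 : String) (n : Nat) :
    pvFw a0 a1 (n + 2) = pvFw a0 a1 (n + 1) ++ pvFw a0 a1 n := rfl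

-- A's loop up to n (n ≥ 1) builds exactly [fw 0, fw 1, …, fw n]
theorem pvLoop_eq (a0 a1 : String) (n : Nat) (hn : 1 ≤ n) :
    (PySem.List.pyRange 2 ((n : Int) + 1) 1).foldl
      (fun ws _ => ws ++ [PySem.List.pyGetD ws (-1) "" ++ PySem.List.pyGetD ws (-2) ""]) [a0, a1]
      = (List.range (n + 1)).map (pvFw a0 a1) := by
  induction n with
  | zero => omega
  | succ m ih =>
    by_cases hm : 1 ≤ m
    · have hsplit : PySem.List.pyRange 2 ((↑(m + 1) : Int) + 1) 1
          = PySem.List.pyRange 2 ((m : Int) + 1) 1 ++ [(m : Int) + 1] := by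
        have := PySem.List.pyRange_one_succ_right (a := 2) (b := (m : Int) + 1) (by omega)
        simpa [add_comm, add_left_comm, add_assoc] using this
      rw [hsplit, List.foldl_append, ih hm]
      obtain ⟨k, rfl⟩ : ∃ k, m = k + 1 := ⟨m - 1, by omega⟩
      simp only [List.foldl_cons, List.foldl_nil]
      have hL : (List.range (k + 1 + 1)).map (pvFw a0 a1)
          = ((List.range (k + 1)).map (pvFw a0 a1)) ++ [pvFw a0 a1 (k + 1)] := by
        simp [List.range_succ]
      have hlen1 : ((List.range (k + 1)).map (pvFw a0 a1)).length = k + 1 := by simp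
      -- last element is fw (k+1), second-to-last is fw k
      have h1 : PySem.List.pyGetD ((List.range (k + 1 + 1)).map (pvFw a0 a1)) (-1) ""
          = pvFw a0 a1 (k + 1) := by
        rw [hL]; exact PySem.List.pyGetD_neg_one_append_singleton _ _ _
      have h2 : PySem.List.pyGetD ((List.range (k + 1 + 1)).map (pvFw a0 a1)) (-2) ""
          = pvFw a0 a1 k := by
        rw [PySem.List.pyGetD_neg_ofNat _ 2 _ (by omega) (by simp)]
        simp
      rw [h1, h2, ← pvFw_succ_succ]
      simp [List.range_succ]
    · -- m = 0: range(2, 2) is empty, result stays [a0, a1] = [fw 0, fw 1]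
      have hm0 : m = 0 := by omega
      subst hm0
      have hnil : PySem.List.pyRange 2 ((((0:Nat) + 1 : Nat) : Int) + 1) 1 = [] :=
        PySem.List.pyRange_one_eq_nil (by norm_num)
      rw [hnil]
      simp [List.range_succ, pvFw]

-- ===== VERDICT (by name: the statement is the Claim_ definition above) =====
theorem generate_fibonacci_word_spec : Claim_equal_generate_fibonacci_word := by
  intro order alphabet _ hpre
  obtain ⟨hord, hlen⟩ := hpre
  obtain ⟨n, rfl⟩ : ∃ n : Nat, order = (n : Int) := ⟨order.toNat, (Int.toNat_of_nonneg hord).symm⟩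
  simp only [Spec_generate_fibonacci_word, generate_fibonacci_word, generate_fibonacci_word_alt,
    Int.toNat_natCast, beq_iff_eq]
  set a0 := PySem.List.pyGetD alphabet 0 "" with ha0
  set a1 := PySem.List.pyGetD alphabet 1 "" with ha1
  by_cases hn : 1 ≤ n
  · obtain ⟨k, rfl⟩ : ∃ k, n = k + 1 := ⟨n - 1, by omega⟩
    rw [pvLoop_eq a0 a1 (k + 1) hn]
    rw [PySem.List.pyGetD_natCast, pvFw2_eq]
    rw [if_neg (by simp; omega)]
    simp [List.getD]
  · have hn0 : n = 0 := by omega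
    subst hn0
    have hnil : PySem.List.pyRange 2 ((((0:Nat) : Nat) : Int) + 1) 1 = [] :=
      PySem.List.pyRange_one_eq_nil (by norm_num)
    rw [hnil]
    simp
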